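-- pv_equiv track=rewrite | github.com/3Juhwan/i-love-ps | BOJ/20437.py | solve
-- ===== SOURCE A (Python) =====
-- from collections import deque
--
-- def solve(arr, k):
--     ans_min, ans_max = 1010101, -1
--     dic = {}
--     for i in range(len(arr)):
--         x = arr[i]
--         if x in dic:
--             dic[x].append(i)
--         else:
--             dic[x] = deque([i])
--         if len(dic[x]) == k:
--             ans_min = min(ans_min, 1 + dic[x][-1] - dic[x][0])
--             ans_max = max(ans_max, 1 + dic[x][-1] - dic[x][0])
--             dic[x].popleft()
--     return (ans_min, ans_max)
-- ===== SOURCE B (Python) =====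
-- def solve(arr, k):
--     ans_min, ans_max = 1010101, -1
--     pos = {}
--     for i, x in enumerate(arr):
--         pos.setdefault(x, []).append(i)
--     if k >= 1:
--         for p in pos.values():
--             for i in range(len(p) - k + 1):
--                 span = p[i + k - 1] - p[i] + 1
--                 if span < ans_min:
--                     ans_min = span
--                 if span > ans_max:
--                     ans_max = span
--     return (ans_min, ans_max)
-- ===== Notes on version B (the rewrite author's own statement) =====
-- stated objective: faster
-- what changed: A interleaves one pass that maintains a size-k rolling deque per value and updates min/max the moment a deque fills; B instead first builds the full occurrence-index list of every value in one pass, then scans each list's fixed-stride windows of k consecutive occurrences in a separate indexed pass.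
import Mathlib
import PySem

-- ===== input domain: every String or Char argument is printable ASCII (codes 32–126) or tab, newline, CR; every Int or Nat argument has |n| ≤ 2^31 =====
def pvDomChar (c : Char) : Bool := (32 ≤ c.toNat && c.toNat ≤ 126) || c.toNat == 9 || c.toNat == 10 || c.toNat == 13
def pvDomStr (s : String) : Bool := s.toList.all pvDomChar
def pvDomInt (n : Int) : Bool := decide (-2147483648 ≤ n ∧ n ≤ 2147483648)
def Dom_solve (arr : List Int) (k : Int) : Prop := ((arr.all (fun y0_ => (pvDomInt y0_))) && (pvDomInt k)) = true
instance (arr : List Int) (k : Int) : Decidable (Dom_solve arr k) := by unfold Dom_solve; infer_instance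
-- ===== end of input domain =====

-- B replaces A's interleaved per-index rolling-deque update by two separate passes (build all occurrence-index
-- lists, then scan fixed-stride windows of each list); same values; measurably faster in Python (no per-element deque ops).

-- ===== PORT A =====
-- loop body of A's 'for i in range(len(arr))' (deque ported as List; the '.getD []' default is unreachable:
-- dic[x] was just inserted, and when the branch fires q has length k ≥ 1, so headD/getLastD defaults are unreachable too)
def solveStep (k : Int) (st : (Int × Int) × PySem.Dict Int (List Int)) (p : Int × Int) : (Int × Int) × PySem.Dict Int (List Int) :=
  let i := p.1
  let x := p.2
  let dic : PySem.Dict Int (List Int) :=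
    match st.2.get? x with
    | some q => st.2.insert x (q ++ [i])
    | none   => st.2.insert x [i]
  let q := (dic.get? x).getD []
  if (q.length : Int) = k then
    ((min st.1.1 (1 + q.getLastD 0 - q.headD 0), max st.1.2 (1 + q.getLastD 0 - q.headD 0)),
     dic.insert x (q.drop 1))
  else
    (st.1, dic)

def solve (arr : List Int) (k : Int) : Int × Int :=
  (List.foldl (solveStep k) ((1010101, -1), PySem.Dict.empty) (PySem.List.enumerate arr)).1

-- ===== PORT B =====
-- Source B: pos.setdefault(x, []).append(i) ported as insert of (getD ++ [i]) — same dict effect (overwrite keeps position,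
-- new key appends); p[i+k-1] / p[i] are in range for every i in the range, so pyGetD's default 0 is unreachable
def solve_alt (arr : List Int) (k : Int) : Int × Int :=
  let pos := (PySem.List.enumerate arr).foldl
    (fun d p => d.insert p.2 (d.getD p.2 [] ++ [p.1])) PySem.Dict.empty
  if 1 ≤ k then
    pos.values.foldl (fun st ps =>
      (PySem.List.pyRange 0 ((ps.length : Int) - k + 1) 1).foldl (fun st i =>
        let span := PySem.List.pyGetD ps (i + k - 1) 0 - PySem.List.pyGetD ps i 0 + 1
        ((if span < st.1 then span else st.1), (if st.2 < span then span else st.2))) st)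
      (1010101, -1)
  else
    (1010101, -1)

-- ===== PRECONDITION & SPEC =====
def Spec_solve (arr : List Int) (k : Int) (out : Int × Int) : Prop := out = solve_alt arr k
instance (arr : List Int) (k : Int) (out : Int × Int) : Decidable (Spec_solve arr k out) := by unfold Spec_solve; infer_instance

-- ===== CLAIM (what is proved, stated in full; the proofs are below) =====
def Claim_equal_solve : Prop := ∀ (arr : List Int) (k : Int), Dom_solve arr k → Spec_solve arr k (solve arr k)

-- ===== LEMMAS AND PROOFS =====

-- running (min, max) accumulator over a list of spans
def pvUpd (st : Int × Int) (s : Int) : Int × Int := (min st.1 s, max st.2 s)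

-- occurrence indices of value x in an enumerated prefix
def pvOcc (x : Int) (l : List (Int × Int)) : List Int := (l.filter (fun p => p.2 == x)).map (·.1)

-- spans of the fixed-stride windows of k consecutive occurrences
def pvSpans (kn : Nat) (ps : List Int) : List Int :=
  (List.range (ps.length + 1 - kn)).map (fun j => ps.getD (j + (kn - 1)) 0 - ps.getD j 0 + 1)

-- distinct values of the prefix, in first-occurrence order
def pvSeen (l : List (Int × Int)) : List Int := PySem.Set.ofList (l.map (·.2))

def pvSpansAll (kn : Nat) (l : List (Int × Int)) : List Int :=
  (pvSeen l).flatMap (fun x => pvSpans kn (pvOcc x l))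

def pvAns (kn : Nat) (l : List (Int × Int)) : Int × Int :=
  List.foldl pvUpd (1010101, -1) (pvSpansAll kn l)

-- what A's deque for x holds: the last min(len, kn-1) occurrence indices
def pvLastWin (kn : Nat) (ps : List Int) : List Int := ps.drop (ps.length + 1 - kn)

-- A's dict invariant
def pvDChar (kn : Nat) (l : List (Int × Int)) (d : PySem.Dict Int (List Int)) : Prop :=
  ∀ x, d.get? x = if pvOcc x l = [] then none else some (pvLastWin kn (pvOcc x l))

theorem pvUpd_comm (st : Int × Int) (a b : Int) : pvUpd (pvUpd st a) b = pvUpd (pvUpd st b) a := by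
  simp [pvUpd, min_assoc, max_assoc, min_comm a b, max_comm a b]

theorem pvFoldl_upd_swap (l : List Int) (st : Int × Int) (s : Int) :
    List.foldl pvUpd (pvUpd st s) l = pvUpd (List.foldl pvUpd st l) s := by
  induction l generalizing st with
  | nil => rfl
  | cons a t ih => simp only [List.foldl_cons, pvUpd_comm st s a, ih]

theorem pvFoldl_upd_mid (l1 l2 : List Int) (st : Int × Int) (s : Int) :
    List.foldl pvUpd st (l1 ++ s :: l2) = pvUpd (List.foldl pvUpd st (l1 ++ l2)) s := by
  induction l1 generalizing st with
  | nil => simp only [List.nil_append, List.foldl_cons, pvFoldl_upd_swap]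
  | cons a t ih => simp only [List.cons_append, List.foldl_cons, ih]

theorem pvOcc_append (x : Int) (l r : List (Int × Int)) :
    pvOcc x (l ++ r) = pvOcc x l ++ pvOcc x r := by
  simp [pvOcc]

theorem pvOcc_singleton (x : Int) (i y : Int) :
    pvOcc x [(i, y)] = if y = x then [i] else [] := by
  by_cases h : y = x <;> simp [pvOcc, h]

theorem pvOcc_cons (x : Int) (p : Int × Int) (t : List (Int × Int)) :
    pvOcc x (p :: t) = (if p.2 = x then [p.1] else []) ++ pvOcc x t := by
  by_cases h : p.2 = x <;> simp [pvOcc, h]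

theorem pvOcc_eq_nil_iff (x : Int) (l : List (Int × Int)) :
    pvOcc x l = [] ↔ x ∉ l.map (·.2) := by
  simp [pvOcc, List.eq_nil_iff_forall_not_mem]

theorem pvGetD_append_lt (l : List Int) (i : Int) (n : Nat) (h : n < l.length) :
    (l ++ [i]).getD n 0 = l.getD n 0 := by
  simp [List.getD_eq_getElem?_getD, List.getElem?_append_left h]

theorem pvGetD_append_len (l : List Int) (i : Int) : (l ++ [i]).getD l.length 0 = i := by
  simp [List.getD_eq_getElem?_getD]

theorem pvHeadD_drop (l : List Int) (n : Nat) (d : Int) : (l.drop n).headD d = l.getD n d := by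
  simp [List.head?_drop, List.getD_eq_getElem?_getD]

theorem pvIfMin (a s : Int) : (if s < a then s else a) = min a s := by
  rw [min_def]; split_ifs <;> omega

theorem pvIfMax (a s : Int) : (if a < s then s else a) = max a s := by
  rw [max_def]; split_ifs <;> omega

theorem pvSpans_snoc (kn : Nat) (hkn : 1 ≤ kn) (ps : List Int) (i : Int) :
    pvSpans kn (ps ++ [i]) =
      pvSpans kn ps ++
        (if kn ≤ ps.length + 1 then [i - (ps ++ [i]).getD (ps.length + 1 - kn) 0 + 1] else []) := by
  by_cases h : kn ≤ ps.length + 1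
  · rw [if_pos h]
    have hlen : (ps ++ [i]).length + 1 - kn = (ps.length + 1 - kn) + 1 := by
      simp only [List.length_append, List.length_cons, List.length_nil]; omega
    rw [pvSpans, hlen, List.range_succ, List.map_append]
    congr 1
    · rw [pvSpans]
      apply List.map_congr_left
      intro j hj; rw [List.mem_range] at hj
      rw [pvGetD_append_lt ps i (j + (kn - 1)) (by omega), pvGetD_append_lt ps i j (by omega)]
    · simp only [List.map_cons, List.map_nil]
      have h1 : (ps.length + 1 - kn) + (kn - 1) = ps.length := by omega
      rw [h1, pvGetD_append_len]
  · rw [if_neg h]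
    have h1 : (ps ++ [i]).length + 1 - kn = 0 := by
      simp only [List.length_append, List.length_cons, List.length_nil]; omega
    have h2 : ps.length + 1 - kn = 0 := by omega
    have h3 : ps.length + 1 + 1 - kn = 0 := by omega
    simp [pvSpans, h2, h3]

theorem pvOcc_snoc_self (l : List (Int × Int)) (i x : Int) :
    pvOcc x (l ++ [(i, x)]) = pvOcc x l ++ [i] := by
  rw [pvOcc_append, pvOcc_singleton, if_pos rfl]

theorem pvOcc_snoc_ne (l : List (Int × Int)) (i x y : Int) (h : y ≠ x) :
    pvOcc y (l ++ [(i, x)]) = pvOcc y l := by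
  rw [pvOcc_append, pvOcc_singleton, if_neg (fun hh => h hh.symm), List.append_nil]

theorem pvSeen_snoc (l : List (Int × Int)) (i x : Int) :
    pvSeen (l ++ [(i, x)]) = if x ∈ l.map (·.2) then pvSeen l else pvSeen l ++ [x] := by
  unfold pvSeen
  have hm : (l ++ [(i, x)]).map (·.2) = l.map (·.2) ++ [x] := by simp
  rw [hm, PySem.Set.ofList_append]
  show (PySem.Set.ofList (l.map (·.2))).add x = _
  by_cases h : x ∈ l.map (·.2)
  · rw [if_pos h, PySem.Set.add_of_mem ((PySem.Set.mem_ofList _ _).2 h)]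
  · rw [if_neg h, PySem.Set.add_of_not_mem (fun hc => h ((PySem.Set.mem_ofList _ _).1 hc))]

theorem pvSpans_nil (kn : Nat) (hkn : 1 ≤ kn) : pvSpans kn [] = [] := by
  have : 0 + 1 - kn = 0 := by omega
  simp [pvSpans, this]

-- the accumulated-answer snoc lemma: appending one occurrence of x adds at most one window's span
theorem pvAns_snoc (kn : Nat) (hkn : 1 ≤ kn) (l : List (Int × Int)) (i x : Int) :
    pvAns kn (l ++ [(i, x)]) =
      if kn ≤ (pvOcc x l).length + 1
      then pvUpd (pvAns kn l) (i - (pvOcc x l ++ [i]).getD ((pvOcc x l).length + 1 - kn) 0 + 1)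
      else pvAns kn l := by
  by_cases hmem : x ∈ l.map (·.2)
  · have hx : x ∈ pvSeen l := (PySem.Set.mem_ofList _ _).2 hmem
    obtain ⟨s1, s2, hsplit⟩ := List.append_of_mem hx
    have hnd : (pvSeen l).Nodup := PySem.Set.nodup_ofList _
    rw [hsplit] at hnd
    have hx1 : x ∉ s1 := fun hm => (List.disjoint_of_nodup_append hnd) hm (List.mem_cons_self)
    have hx2 : x ∉ s2 := (List.nodup_cons.mp (List.nodup_append.mp hnd).2.1).1
    have hcong1 : s1.flatMap (fun y => pvSpans kn (pvOcc y (l ++ [(i, x)])))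
        = s1.flatMap (fun y => pvSpans kn (pvOcc y l)) :=
      List.flatMap_congr (fun y hy => by
        rw [pvOcc_snoc_ne l i x y (fun he => hx1 (he ▸ hy))])
    have hcong2 : s2.flatMap (fun y => pvSpans kn (pvOcc y (l ++ [(i, x)])))
        = s2.flatMap (fun y => pvSpans kn (pvOcc y l)) :=
      List.flatMap_congr (fun y hy => by
        rw [pvOcc_snoc_ne l i x y (fun he => hx2 (he ▸ hy))])
    have e1 : pvSpansAll kn (l ++ [(i, x)]) =
        s1.flatMap (fun y => pvSpans kn (pvOcc y l)) ++
          pvSpans kn (pvOcc x l ++ [i]) ++ s2.flatMap (fun y => pvSpans kn (pvOcc y l)) := by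
      rw [pvSpansAll, pvSeen_snoc, if_pos hmem, hsplit]
      simp only [List.flatMap_append, List.flatMap_cons, hcong1, hcong2, pvOcc_snoc_self,
        List.append_assoc]
    have e0 : pvSpansAll kn l =
        s1.flatMap (fun y => pvSpans kn (pvOcc y l)) ++
          pvSpans kn (pvOcc x l) ++ s2.flatMap (fun y => pvSpans kn (pvOcc y l)) := by
      rw [pvSpansAll, hsplit]
      simp only [List.flatMap_append, List.flatMap_cons, List.append_assoc]
    rw [pvAns, pvAns, e1, e0, pvSpans_snoc kn hkn]
    by_cases hc : kn ≤ (pvOcc x l).length + 1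
    · rw [if_pos hc, if_pos hc]
      have hmid := pvFoldl_upd_mid
        (s1.flatMap (fun y => pvSpans kn (pvOcc y l)) ++ pvSpans kn (pvOcc x l))
        (s2.flatMap (fun y => pvSpans kn (pvOcc y l))) (1010101, -1)
        (i - (pvOcc x l ++ [i]).getD ((pvOcc x l).length + 1 - kn) 0 + 1)
      simp only [List.append_assoc, List.cons_append, List.nil_append] at hmid ⊢
      exact hmid
    · rw [if_neg hc, if_neg hc, List.append_nil]
  · have hps : pvOcc x l = [] := (pvOcc_eq_nil_iff x l).2 hmem
    have hcong : (pvSeen l).flatMap (fun y => pvSpans kn (pvOcc y (l ++ [(i, x)])))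
        = (pvSeen l).flatMap (fun y => pvSpans kn (pvOcc y l)) :=
      List.flatMap_congr (fun y hy => by
        have hy' : y ∈ l.map (·.2) := (PySem.Set.mem_ofList _ _).1 hy
        rw [pvOcc_snoc_ne l i x y (fun he => hmem (he ▸ hy'))])
    have e1 : pvSpansAll kn (l ++ [(i, x)]) =
        pvSpansAll kn l ++ pvSpans kn (pvOcc x l ++ [i]) := by
      rw [pvSpansAll, pvSeen_snoc, if_neg hmem]
      simp only [List.flatMap_append, List.flatMap_cons, List.flatMap_nil, hcong,
        pvOcc_snoc_self, List.append_nil, pvSpansAll]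
    rw [pvAns, pvAns, e1, pvSpans_snoc kn hkn, hps]
    simp only [List.nil_append, List.length_nil, pvSpans_nil kn hkn]
    by_cases hc : kn ≤ 0 + 1
    · rw [if_pos hc, if_pos hc, List.foldl_append, List.foldl_cons, List.foldl_nil]
    · rw [if_neg hc, if_neg hc, List.append_nil]

-- the single-step lemma for A's loop
theorem pvStepA (kn : Nat) (hkn : 1 ≤ kn) (l : List (Int × Int)) (d : PySem.Dict Int (List Int))
    (hd : pvDChar kn l d) (i x : Int) :
    ∃ d', solveStep (kn : Int) (pvAns kn l, d) (i, x) = (pvAns kn (l ++ [(i, x)]), d') ∧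
      pvDChar kn (l ++ [(i, x)]) d' := by
  have hdx := hd x
  -- the deque A inserts for x, uniformly in both match branches
  set ps := pvOcc x l with hps
  set c := ps.length with hc
  set q : List Int := pvLastWin kn ps ++ [i] with hq
  clear_value ps c q
  have hqd : q = (ps ++ [i]).drop (c + 1 - kn) := by
    rw [hq, pvLastWin, ← hc, List.drop_append_of_le_length (by omega)]
  have hqlen : q.length = c + 1 - (c + 1 - kn) := by
    rw [hqd, List.length_drop]; simp; omega
  have htrig : ((q.length : Int) = (kn : Int)) ↔ kn ≤ c + 1 := by
    rw [Nat.cast_inj]; omega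
  have hlast : q.getLastD 0 = i := by rw [hq]; exact List.getLastD_concat
  have hhead : q.headD 0 = (ps ++ [i]).getD (c + 1 - kn) 0 := by
    rw [hqd, pvHeadD_drop]
  have hspan : 1 + q.getLastD 0 - q.headD 0
      = i - (ps ++ [i]).getD (c + 1 - kn) 0 + 1 := by
    rw [hlast, hhead]; ring
  have hstep : solveStep (kn : Int) (pvAns kn l, d) (i, x) =
      if (q.length : Int) = (kn : Int) then
        ((min (pvAns kn l).1 (1 + q.getLastD 0 - q.headD 0),
          max (pvAns kn l).2 (1 + q.getLastD 0 - q.headD 0)),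
         (d.insert x q).insert x (q.drop 1))
      else (pvAns kn l, d.insert x q) := by
    unfold solveStep
    dsimp only
    by_cases hnil : ps = []
    · rw [hdx, if_pos hnil]
      have hq' : q = [i] := by rw [hq, hnil, pvLastWin]; simp
      rw [← hq', PySem.Dict.get?_insert_self]
      rfl
    · rw [hdx, if_neg hnil, PySem.Dict.get?_insert_self]
      simp only [Option.getD_some]
      rw [← hq]
  -- the value A's dict ends up holding for x
  have hwin : pvLastWin kn (ps ++ [i]) = (ps ++ [i]).drop (c + 2 - kn) := by
    rw [pvLastWin]; congr 1; simp [← hc]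
  by_cases ht : kn ≤ c + 1
  · refine ⟨d.insert x (q.drop 1), ?_, ?_⟩
    · rw [hstep, if_pos (htrig.2 ht), hspan, PySem.Dict.insert_insert_self,
        pvAns_snoc kn hkn l i x, if_pos (by rw [← hps, ← hc]; exact ht), ← hps, ← hc]
      rfl
    · intro y
      rw [PySem.Dict.get?_insert]
      by_cases hy : y = x
      · subst hy
        rw [if_pos rfl, pvOcc_snoc_self, ← hps]
        rw [if_neg (by simp)]
        rw [hwin, hqd, List.drop_drop]
        congr 2
        omega
      · rw [if_neg hy, pvOcc_snoc_ne l i x y hy, hd y]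
  · refine ⟨d.insert x q, ?_, ?_⟩
    · rw [hstep, if_neg (fun hh => ht (htrig.1 hh)),
        pvAns_snoc kn hkn l i x, if_neg (by rw [← hps, ← hc]; exact ht)]
    · intro y
      rw [PySem.Dict.get?_insert]
      by_cases hy : y = x
      · subst hy
        rw [if_pos rfl, pvOcc_snoc_self, ← hps]
        rw [if_neg (by simp)]
        rw [hwin, hqd]
        congr 2
        omega
      · rw [if_neg hy, pvOcc_snoc_ne l i x y hy, hd y]

theorem pvLoopA (kn : Nat) (hkn : 1 ≤ kn) :
    ∀ (r l : List (Int × Int)) (d : PySem.Dict Int (List Int)), pvDChar kn l d →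
      (List.foldl (solveStep (kn : Int)) (pvAns kn l, d) r).1 = pvAns kn (l ++ r) := by
  intro r
  induction r with
  | nil => intro l d _; simp
  | cons p t ih =>
      intro l d hd
      obtain ⟨d', hstep, hd'⟩ := pvStepA kn hkn l d hd p.1 p.2
      calc (List.foldl (solveStep (kn : Int)) (pvAns kn l, d) (p :: t)).1
          = (List.foldl (solveStep (kn : Int)) (pvAns kn (l ++ [p]), d') t).1 := by
            simp only [List.foldl_cons]; rw [show (p.1, p.2) = p from rfl] at hstep; rw [hstep]
        _ = pvAns kn ((l ++ [p]) ++ t) := ih (l ++ [p]) d' hd'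
        _ = pvAns kn (l ++ p :: t) := by simp

theorem pvLoopA_nonpos (k : Int) (hk : k ≤ 0) :
    ∀ (r : List (Int × Int)) (st : (Int × Int) × PySem.Dict Int (List Int)),
      (List.foldl (solveStep k) st r).1 = st.1 := by
  intro r
  induction r with
  | nil => intro st; rfl
  | cons p t ih =>
      intro st
      rw [List.foldl_cons, ih]
      show (solveStep k st p).1 = st.1
      unfold solveStep
      rcases hg : st.2.get? p.2 with _ | q
      · have h1 : ((st.2.insert p.2 [p.1]).get? p.2).getD [] = [p.1] := by
          rw [PySem.Dict.get?_insert_self]; rfl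
        simp only [hg, h1]
        rw [if_neg (by simp; omega)]
      · have h1 : ((st.2.insert p.2 (q ++ [p.1])).get? p.2).getD [] = q ++ [p.1] := by
          rw [PySem.Dict.get?_insert_self]; rfl
        simp only [hg, h1]
        rw [if_neg (by simp; omega)]

-- B's dict
theorem pvBuild_getD (l : List (Int × Int)) (d : PySem.Dict Int (List Int)) (x : Int) :
    (List.foldl (fun d p => d.insert p.2 (d.getD p.2 [] ++ [p.1])) d l).getD x [] =
      d.getD x [] ++ pvOcc x l := by
  induction l generalizing d with
  | nil => simp [pvOcc]
  | cons p t ih =>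
      rw [List.foldl_cons, ih, PySem.Dict.getD_insert, pvOcc_cons]
      by_cases h : x = p.2
      · subst h; rw [if_pos rfl, if_pos rfl]; simp
      · rw [if_neg h, if_neg (fun hh => h hh.symm)]; simp

theorem pvInner (kn : Nat) (hkn : 1 ≤ kn) (ps : List Int) (st : Int × Int) :
    (PySem.List.pyRange 0 ((ps.length : Int) - (kn : Int) + 1) 1).foldl (fun st i =>
        let span := PySem.List.pyGetD ps (i + (kn : Int) - 1) 0 - PySem.List.pyGetD ps i 0 + 1
        ((if span < st.1 then span else st.1), (if st.2 < span then span else st.2))) st =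
      List.foldl pvUpd st (pvSpans kn ps) := by
  have hrange : PySem.List.pyRange 0 ((ps.length : Int) - (kn : Int) + 1) 1
      = (List.range (ps.length + 1 - kn)).map (fun j : Nat => (j : Int)) := by
    by_cases h : kn ≤ ps.length + 1
    · have hc : ((ps.length : Int) - (kn : Int) + 1) = ((ps.length + 1 - kn : Nat) : Int) := by omega
      rw [hc]; exact PySem.List.pyRange_zero_natCast _
    · have h0 : ps.length + 1 - kn = 0 := by omega
      rw [PySem.List.pyRange_one_eq_nil (by omega), h0]; rfl
  rw [hrange, pvSpans, List.foldl_map, List.foldl_map]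
  congr 1
  funext acc j
  have hidx : (j : Int) + (kn : Int) - 1 = ((j + (kn - 1) : Nat) : Int) := by omega
  simp only [hidx, PySem.List.pyGetD_natCast, pvUpd, pvIfMin, pvIfMax]

theorem pvB_eq (kn : Nat) (hkn : 1 ≤ kn) (arr : List Int) :
    solve_alt arr (kn : Int) = pvAns kn (PySem.List.enumerate arr) := by
  unfold solve_alt
  rw [if_pos (by exact_mod_cast hkn : (1:Int) ≤ (kn : Int))]
  set l := PySem.List.enumerate arr with hl
  set d := List.foldl (fun d p => d.insert p.2 (d.getD p.2 [] ++ [p.1])) PySem.Dict.empty l with hdd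
  have hkeys : d.keys = pvSeen l := by
    rw [hdd, PySem.Dict.keys_foldl_insert_key l (·.2) _ PySem.Dict.empty]
    rfl
  have hnd : d.keys.Nodup := by
    rw [hdd]
    exact PySem.Dict.nodup_keys_foldl_insert_key _ _ _ _ PySem.Dict.nodup_keys_empty
  have hvals : d.values = (pvSeen l).map (fun x => pvOcc x l) := by
    rw [PySem.Dict.values_eq_map_keys d hnd [], hkeys]
    apply List.map_congr_left
    intro x _
    rw [hdd, pvBuild_getD]
    simp
  rw [hvals, List.foldl_map, pvAns, pvSpansAll, List.foldl_flatMap]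
  congr 1
  funext st x
  exact pvInner kn hkn (pvOcc x l) st

-- ===== VERDICT (by name: the statement is the Claim_ definition above) =====
theorem solve_spec : Claim_equal_solve := by
  intro arr k _
  unfold Spec_solve
  by_cases hk : 1 ≤ k
  · obtain ⟨kn, rfl⟩ : ∃ kn : Nat, k = (kn : Int) := ⟨k.toNat, (Int.toNat_of_nonneg (by omega)).symm⟩
    have hkn : 1 ≤ kn := by exact_mod_cast hk
    rw [pvB_eq kn hkn arr]
    unfold solve
    have h0 : pvDChar kn [] PySem.Dict.empty := by
      intro x; simp [pvOcc, PySem.Dict.get?_empty]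
    have : pvAns kn ([] : List (Int × Int)) = (1010101, -1) := rfl
    rw [← this]
    have := pvLoopA kn hkn (PySem.List.enumerate arr) [] PySem.Dict.empty h0
    simpa using this
  · unfold solve solve_alt
    rw [pvLoopA_nonpos k (by omega) _ _]
    simp only [if_neg (by omega : ¬ (1:Int) ≤ k)]
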